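-- pv_equiv track=rewrite | github.com/S0okJu/BOJ | 1000-1999/1000-1099/1049/1049.py | solution
-- ===== SOURCE A (Python) =====
-- def solution(N, bundles, ones):
--     target = N
--
--     # 묶음과 낱개 중에서 싼 제품을 사용한다.
--     min_bundle = min(bundles)
--     min_ones = min(ones)
--
--     result = 0
--
--     while target > 0:
--
--         # 6개 미만이라도 묶음 가격이 더 쌀 수 있음
--         if target < 6:
--             if min_bundle < (target * min_ones):
--                 result += min_bundle
--             else:
--                 result+=(target * min_ones)
--             break
--         else:
--             # 묶음으로 수행하는 경우 vs 개별로 사용하는 경우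
--             bundle_cnt = (target//6)
--             target = target % 6
--             # 묶음이 더 싸다면 묶음 가격으로 측정
--             if bundle_cnt* min_bundle < bundle_cnt * 6 * min_ones:
--                 result += (bundle_cnt* min_bundle)
--             else:
--                 result += bundle_cnt * 6 * min_ones
--
--     return result
-- ===== SOURCE B (Python) =====
-- def solution(N, bundles, ones):
--     # Enumerate the complete purchase strategies and take the global minimum:
--     # all bundles; full bundles + singles for the rest; singles plus one bundle
--     # for the remainder; all singles.
--     mb = min(bundles)
--     mo = min(ones)
--     if N <= 0:
--         return 0
--     q, r = divmod(N, 6)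
--     if r == 0:
--         plans = (q * mb, N * mo)
--     else:
--         plans = ((q + 1) * mb, q * mb + r * mo, mb + 6 * q * mo, N * mo)
--     return min(plans)
-- ===== Notes on version B (the rewrite author's own statement) =====
-- stated objective: alternative
-- what changed: Replaced A's while-loop that greedily peels off the bundle part then the remainder (with a min at each stage) by an enumeration of the complete purchase strategies (all bundles; full bundles plus singles; singles plus one bundle for the remainder; all singles) and a single global min over them.
import Mathlib
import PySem

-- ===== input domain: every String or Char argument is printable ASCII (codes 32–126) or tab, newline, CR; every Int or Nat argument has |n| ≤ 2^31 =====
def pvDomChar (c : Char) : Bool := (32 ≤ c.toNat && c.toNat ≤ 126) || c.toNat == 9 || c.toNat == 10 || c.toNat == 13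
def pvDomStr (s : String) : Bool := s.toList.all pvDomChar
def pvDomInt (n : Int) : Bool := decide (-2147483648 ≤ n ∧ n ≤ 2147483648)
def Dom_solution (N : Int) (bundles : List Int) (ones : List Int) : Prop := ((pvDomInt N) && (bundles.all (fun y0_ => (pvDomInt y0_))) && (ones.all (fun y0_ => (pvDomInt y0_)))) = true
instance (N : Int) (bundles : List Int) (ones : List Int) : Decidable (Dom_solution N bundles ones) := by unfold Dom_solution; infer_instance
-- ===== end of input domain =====

-- B enumerates complete purchase strategies and takes one global min, replacing A's staged greedy loop; return value only, no speed claim.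

-- ===== PORT A =====
-- the while-loop of A: state (target, result); each else-iteration sets target to target % 6
def solLoopA (target result min_bundle min_ones : Int) : Int :=
  if _h : target > 0 then
    if target < 6 then
      (if min_bundle < target * min_ones then result + min_bundle
       else result + target * min_ones)
    else
      solLoopA (PySem.Int.mod target 6)
        (if (PySem.Int.floordiv target 6) * min_bundle <
             (PySem.Int.floordiv target 6) * 6 * min_ones
         then result + (PySem.Int.floordiv target 6) * min_bundle
         else result + (PySem.Int.floordiv target 6) * 6 * min_ones)
        min_bundle min_ones
  else result
termination_by target.toNat
decreasing_by
  have h1 : PySem.Int.mod target 6 < 6 := PySem.Int.mod_lt target (by norm_num)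
  omega

def solution (N : Int) (bundles : List Int) (ones : List Int) : Int :=
  match PySem.List.min? bundles (fun x => x), PySem.List.min? ones (fun x => x) with
  | some min_bundle, some min_ones => solLoopA N 0 min_bundle min_ones
  | _, _ => 0   -- Python raises ValueError on an empty list; excluded by Pre_

-- ===== PORT B =====
def solution_alt (N : Int) (bundles : List Int) (ones : List Int) : Int :=
  match PySem.List.min? bundles (fun x => x) with
  | none => 0   -- Python raises ValueError on an empty list; excluded by Pre_
  | some mb =>
    match PySem.List.min? ones (fun x => x) with
    | none => 0
    | some mo =>
      if N ≤ 0 then 0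
      else
        let q := PySem.Int.floordiv N 6
        let r := PySem.Int.mod N 6
        if r = 0 then
          min (q * mb) (N * mo)
        else
          min ((q + 1) * mb) (min (q * mb + r * mo) (min (mb + 6 * q * mo) (N * mo)))

-- ===== PRECONDITION & SPEC =====
-- A (and B) raise ValueError via min() on an empty price list; both lists must be nonempty.
def Pre_solution (N : Int) (bundles : List Int) (ones : List Int) : Prop :=
  bundles ≠ [] ∧ ones ≠ []
instance (N : Int) (bundles : List Int) (ones : List Int) : Decidable (Pre_solution N bundles ones) := by unfold Pre_solution; infer_instance
def pvWitness_solution : Int × List Int × List Int := (13, [10, 9], [2, 3])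

def Spec_solution (N : Int) (bundles : List Int) (ones : List Int) (out : Int) : Prop := out = solution_alt N bundles ones
instance (N : Int) (bundles : List Int) (ones : List Int) (out : Int) : Decidable (Spec_solution N bundles ones out) := by unfold Spec_solution; infer_instance

-- ===== CLAIM (what is proved, stated in full; the proofs are below) =====
def Claim_equal_solution : Prop := ∀ (N : Int) (bundles : List Int) (ones : List Int), Dom_solution N bundles ones → Pre_solution N bundles ones → Spec_solution N bundles ones (solution N bundles ones)

-- ===== LEMMAS AND PROOFS =====

lemma add_ite_lt (c a b : Int) : (if a < b then c + a else c + b) = c + min a b := by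
  rw [min_def]; split_ifs <;> omega

lemma min_add_min (a b c d : Int) :
    min a b + min c d = min (a + c) (min (a + d) (min (b + c) (b + d))) := by
  rw [min_def, min_def, min_def, min_def, min_def]; split_ifs <;> omega

-- A's loop computes B's plan minimum
lemma loop_eq (N mb mo : Int) :
    solLoopA N 0 mb mo =
      (if N ≤ 0 then 0
       else
         if PySem.Int.mod N 6 = 0 then
           min (PySem.Int.floordiv N 6 * mb) (N * mo)
         else
           min ((PySem.Int.floordiv N 6 + 1) * mb)
             (min (PySem.Int.floordiv N 6 * mb + PySem.Int.mod N 6 * mo)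
                (min (mb + 6 * PySem.Int.floordiv N 6 * mo) (N * mo)))) := by
  by_cases hN : N ≤ 0
  · rw [solLoopA, dif_neg (by omega), if_pos hN]
  · have hNpos : 0 < N := by omega
    have hmul := PySem.Int.floordiv_mul_add_mod N 6
    have hmlt : PySem.Int.mod N 6 < 6 := PySem.Int.mod_lt N (by norm_num)
    have hmnn : 0 ≤ PySem.Int.mod N 6 := PySem.Int.mod_nonneg N (by norm_num)
    rw [if_neg hN]
    set q := PySem.Int.floordiv N 6 with hq
    set r := PySem.Int.mod N 6 with hr
    by_cases h6 : N < 6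
    · -- one iteration, break branch; q = 0 and r = N > 0
      have hq0 : q = 0 := by omega
      have hrN : r = N := by omega
      rw [solLoopA, dif_pos (by omega), if_pos h6, add_ite_lt,
          if_neg (show ¬ r = 0 by omega)]
      simp only [hq0, hrN, zero_mul, zero_add, one_mul, mul_zero, add_zero]
      simp only [min_def]; split_ifs <;> omega
    · -- else branch: one peeling step, then (possibly) the remainder step
      have hqpos : 0 < q := by omega
      rw [solLoopA, dif_pos (by omega), if_neg h6]
      rw [show PySem.Int.floordiv N 6 = q from rfl, show PySem.Int.mod N 6 = r from rfl]
      have hstep : (if q * mb < q * 6 * mo then (0:Int) + q * mb else 0 + q * 6 * mo)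
          = min (q * mb) (q * 6 * mo) := by
        rcases lt_trichotomy (q * mb) (q * 6 * mo) with h | h | h <;>
          simp [h, le_of_lt]
      rw [hstep]
      by_cases hr0 : r = 0
      · rw [solLoopA, dif_neg (by omega), if_pos hr0]
        have : N * mo = q * 6 * mo := by rw [show N = 6 * q by omega]; ring
        rw [this]
      · rw [solLoopA, dif_pos (by omega), if_pos (by omega), add_ite_lt, if_neg hr0,
            min_add_min,
            show (q + 1) * mb = q * mb + mb by ring,
            show mb + 6 * q * mo = q * 6 * mo + mb by ring,
            show N * mo = q * 6 * mo + r * mo by rw [show N = 6 * q + r by omega]; ring]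

-- ===== VERDICT (by name: the statement is the Claim_ definition above) =====
theorem solution_spec : Claim_equal_solution := by
  intro N bundles ones _ hPre
  unfold Spec_solution solution solution_alt
  rcases hPre with ⟨hb, ho⟩
  have hb' : PySem.List.min? bundles (fun x => x) ≠ none := by
    simp [PySem.List.min?_eq_none_iff, hb]
  have ho' : PySem.List.min? ones (fun x => x) ≠ none := by
    simp [PySem.List.min?_eq_none_iff, ho]
  rcases Option.ne_none_iff_exists'.mp hb' with ⟨mb, hmb⟩
  rcases Option.ne_none_iff_exists'.mp ho' with ⟨mo, hmo⟩
  rw [hmb, hmo]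
  simpa using loop_eq N mb mo
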